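-- pv_equiv track=rewrite | github.com/JoseCutileiro/MEIC | Projetos/PPLA/17/parser.py | canTake_parsing
-- ===== SOURCE A (Python) =====
-- def canTake_parsing(L):
--     L = sorted(L)
--     ret = 0
--     mul = 1
--     for e in L:
--         ret = ret + e * mul
--         mul *= 10
--     return ret
-- ===== SOURCE B (Python) =====
-- def canTake_parsing(L):
--     rest = list(L)
--     ret = 0
--     while rest:
--         m = max(rest)
--         rest.remove(m)
--         ret = ret * 10 + m
--     return ret
-- ===== Notes on version B (the rewrite author's own statement) =====
-- stated objective: alternative
-- what changed: B never sorts: it iteratively selects and removes the maximum of a shrinking working list, folding each extracted maximum into a single accumulator, instead of sorting ascending and scanning with a power-of-10 multiplier.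
import Mathlib
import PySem

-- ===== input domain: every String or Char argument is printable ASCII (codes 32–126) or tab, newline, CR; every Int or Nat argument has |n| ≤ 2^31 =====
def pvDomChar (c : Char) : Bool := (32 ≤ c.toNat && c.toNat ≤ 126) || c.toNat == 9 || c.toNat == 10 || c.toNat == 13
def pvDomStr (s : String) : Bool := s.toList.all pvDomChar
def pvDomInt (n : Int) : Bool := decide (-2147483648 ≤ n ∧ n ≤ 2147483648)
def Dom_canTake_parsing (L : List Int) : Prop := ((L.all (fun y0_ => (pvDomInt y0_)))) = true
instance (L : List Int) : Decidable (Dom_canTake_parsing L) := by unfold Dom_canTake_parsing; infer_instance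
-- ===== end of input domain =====

-- B replaces A's sort-then-accumulate by sort-free iterative selection: repeatedly
-- extract the maximum of a shrinking working list and fold it in (alternative algorithm, same results).

-- ===== PORT A =====
-- L = sorted(L); ret = 0; mul = 1; for e in L: ret += e*mul; mul *= 10; return ret
def canTake_parsing (L : List Int) : Int :=
  let Ls := PySem.List.sorted L (fun x => x) false
  (Ls.foldl (fun (p : Int × Int) e => (p.1 + e * p.2, p.2 * 10)) (0, 1)).1

-- ===== PORT B =====
-- while rest: m = max(rest); rest.remove(m); ret = ret*10 + m
-- (the 'none' fallbacks only make the loop total: max/remove always succeed on a nonempty list)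
def canTakeLoop (rest : List Int) (ret : Int) : Int :=
  match hM : PySem.List.max? rest (fun x => x) with
  | none => ret
  | some m =>
    match hR : PySem.List.remove? rest m with
    | none => ret
    | some rest' => canTakeLoop rest' (ret * 10 + m)
termination_by rest.length
decreasing_by
  have hm : m ∈ rest := PySem.List.max?_mem hM
  have h2 := hR.symm.trans (PySem.List.remove?_eq_some_erase rest m hm)
  cases Option.some.inj h2
  have := List.length_erase_of_mem hm
  have hpos : 0 < rest.length := List.length_pos_of_mem hm
  omega

def canTake_parsing_alt (L : List Int) : Int := canTakeLoop L 0

-- ===== PRECONDITION & SPEC =====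
def Spec_canTake_parsing (L : List Int) (out : Int) : Prop := out = canTake_parsing_alt L
instance (L : List Int) (out : Int) : Decidable (Spec_canTake_parsing L out) := by unfold Spec_canTake_parsing; infer_instance

-- ===== CLAIM (what is proved, stated in full; the proofs are below) =====
def Claim_equal_canTake_parsing : Prop := ∀ (L : List Int), Dom_canTake_parsing L → Spec_canTake_parsing L (canTake_parsing L)

-- ===== LEMMAS AND PROOFS =====

-- the ascending-positional value e0 + 10*e1 + 100*e2 + … of a list
def pvPoly : List Int → Int
  | [] => 0
  | e :: t => e + 10 * pvPoly t

theorem pvFoldA (l : List Int) (r m : Int) :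
    (l.foldl (fun (p : Int × Int) e => (p.1 + e * p.2, p.2 * 10)) (r, m)).1 = r + m * pvPoly l := by
  induction l generalizing r m with
  | nil => simp [pvPoly]
  | cons e t ih => simp [List.foldl, pvPoly, ih]; ring

theorem pvPoly_append_singleton (xs : List Int) (m : Int) :
    pvPoly (xs ++ [m]) = pvPoly xs + m * 10 ^ xs.length := by
  induction xs with
  | nil => simp [pvPoly]
  | cons e t ih => simp [pvPoly, ih]; ring

-- sorted(L) puts the maximum last: sorted L = sorted (L.erase m) ++ [m]
theorem pvSortedMaxLast (L : List Int) (m : Int)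
    (hM : PySem.List.max? L (fun x => x) = some m) :
    PySem.List.sorted L (fun x => x) false
      = PySem.List.sorted (L.erase m) (fun x => x) false ++ [m] := by
  have hm : m ∈ L := PySem.List.max?_mem hM
  apply PySem.List.sorted_id_eq_of_perm_of_pairwise
  · have h1 : (PySem.List.sorted (L.erase m) (fun x => x) false ++ [m]).Perm ((L.erase m) ++ [m]) :=
      (PySem.List.sorted_perm (L.erase m) (fun x => x) false).append_right [m]
    have h2 : ((L.erase m) ++ [m]).Perm (m :: L.erase m) := List.perm_append_singleton _ _
    have h3 : (m :: L.erase m).Perm L := (List.perm_cons_erase hm).symm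
    exact (h1.trans h2).trans h3
  · rw [List.pairwise_append]
    refine ⟨PySem.List.sorted_pairwise (L.erase m) (fun x => x), List.pairwise_singleton _ _, ?_⟩
    intro a ha b hb
    have hb' : b = m := List.mem_singleton.mp hb
    rw [hb']
    exact PySem.List.max?_isMax hM a
      (List.mem_of_mem_erase ((PySem.List.mem_sorted (L.erase m) (fun x => x) false a).mp ha))

-- loop invariant: the selection loop computes ret·10^|rest| + pvPoly(sorted rest)
theorem pvLoopEq (n : Nat) : ∀ (rest : List Int) (ret : Int), rest.length = n →
    canTakeLoop rest ret = ret * 10 ^ rest.length + pvPoly (PySem.List.sorted rest (fun x => x) false) := by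
  induction n using Nat.strong_induction_on with
  | _ n ih =>
    intro rest ret hn
    rw [canTakeLoop.eq_def]
    cases hM : PySem.List.max? rest (fun x => x) with
    | none =>
      have : rest = [] := (PySem.List.max?_eq_none_iff rest (fun x => x)).mp hM
      subst this
      simp [PySem.List.sorted, pvPoly]
    | some m =>
      have hm : m ∈ rest := PySem.List.max?_mem hM
      simp only [hM]
      split
      case _ hR => exact absurd ((PySem.List.remove?_eq_none_iff rest m).mp hR) (by simp [hm])
      case _ rest' hR =>
        have h2 := hR.symm.trans (PySem.List.remove?_eq_some_erase rest m hm)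
        cases Option.some.inj h2
        have hlen : (rest.erase m).length = rest.length - 1 := List.length_erase_of_mem hm
        have hpos : 0 < rest.length := List.length_pos_of_mem hm
        rw [ih (rest.erase m).length (by omega) _ _ rfl,
            pvSortedMaxLast rest m hM, pvPoly_append_singleton,
            PySem.List.length_sorted]
        have h10 : (10:Int) ^ rest.length = 10 ^ (rest.erase m).length * 10 := by
          rw [hlen, ← pow_succ]; congr 1; omega
        rw [h10]; ring

-- ===== VERDICT (by name: the statement is the Claim_ definition above) =====
theorem canTake_parsing_spec : Claim_equal_canTake_parsing := by
  intro L _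
  unfold Spec_canTake_parsing canTake_parsing canTake_parsing_alt
  rw [pvFoldA, pvLoopEq L.length L 0 rfl]
  ring
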